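-- pv_equiv track=rewrite | github.com/ELDJAZAERY/NPL-AR | data/recherche.py | get_Chi3r_form
-- ===== SOURCE A (Python) =====
-- def get_Chi3r_form(text):
--     chi3r = '';
--
--     lines = text.split('\n');
--
--     i = 0;
--     bayt_chi3r = '';
--     for line in lines:
--         if(i == 2):
--             chi3r += bayt_chi3r + ' . \n';
--             bayt_chi3r = '';
--             i = 0;
--         else :
--             bayt_chi3r += ' '+line;
--             i += 1;
--
--     return chi3r;
-- ===== SOURCE B (Python) =====
-- def get_Chi3r_form(text):
--     lines = text.split('\n')
--     return ''.join(' ' + lines[3 * k] + ' ' + lines[3 * k + 1] + ' . \n'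
--                    for k in range(len(lines) // 3))
-- ===== Notes on version B (the rewrite author's own statement) =====
-- stated objective: simpler
-- what changed: Replaced the per-line counter/flush state machine with direct chunk indexing: one join over range(len(lines)//3), formatting each verse from lines 3k and 3k+1 and never touching the discarded third line or a trailing partial group.
import Mathlib
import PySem

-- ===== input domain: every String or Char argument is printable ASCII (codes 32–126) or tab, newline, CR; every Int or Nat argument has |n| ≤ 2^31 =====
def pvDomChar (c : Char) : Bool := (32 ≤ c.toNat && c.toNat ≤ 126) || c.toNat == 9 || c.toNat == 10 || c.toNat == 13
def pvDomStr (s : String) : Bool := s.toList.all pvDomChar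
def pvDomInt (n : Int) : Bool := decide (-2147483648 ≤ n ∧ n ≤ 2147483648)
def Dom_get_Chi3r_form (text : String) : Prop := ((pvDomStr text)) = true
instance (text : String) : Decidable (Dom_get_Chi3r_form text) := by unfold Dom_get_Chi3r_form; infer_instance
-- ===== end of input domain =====

-- B replaces A's per-line counter/flush state machine by direct chunk indexing over range(len(lines)//3); simpler, same cost.

-- ===== PORT A =====
-- A's for-loop over lines with state (chi3r, bayt_chi3r, i), as structural recursion over the same state.
def pvLoopA : List (List Char) → List Char → List Char → Nat → List Char
  | [], chi3r, _, _ => chi3r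
  | line :: rest, chi3r, bayt, i =>
      if i == 2 then pvLoopA rest (chi3r ++ bayt ++ [' ', '.', ' ', '\n']) [] 0
      else pvLoopA rest chi3r (bayt ++ ' ' :: line) (i + 1)

def get_Chi3r_form (text : String) : String :=
  let lines := PySem.Chars.splitOn text.toList ['\n']
  String.ofList (pvLoopA lines [] [] 0)

-- ===== PORT B =====
-- one verse: ' ' + lines[3k] + ' ' + lines[3k+1] + ' . \n'; the index is always in range (k < len/3), so getD's default is never used
def pvVerse (lines : List (List Char)) (k : Nat) : List Char :=
  ' ' :: lines.getD (3 * k) [] ++ ' ' :: lines.getD (3 * k + 1) [] ++ [' ', '.', ' ', '\n']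

def get_Chi3r_form_alt (text : String) : String :=
  let lines := PySem.Chars.splitOn text.toList ['\n']
  String.ofList (PySem.Chars.join [] ((List.range (lines.length / 3)).map (pvVerse lines)))

-- ===== PRECONDITION & SPEC =====
def Spec_get_Chi3r_form (text : String) (out : String) : Prop := out = get_Chi3r_form_alt text
instance (text : String) (out : String) : Decidable (Spec_get_Chi3r_form text out) := by unfold Spec_get_Chi3r_form; infer_instance

-- ===== CLAIM (what is proved, stated in full; the proofs are below) =====
def Claim_equal_get_Chi3r_form : Prop := ∀ (text : String), Dom_get_Chi3r_form text → Spec_get_Chi3r_form text (get_Chi3r_form text)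

-- ===== LEMMAS AND PROOFS =====

-- common characterisation: the text both programs emit, three lines at a time
def pvChunks : List (List Char) → List Char
  | a :: b :: _ :: rest => ' ' :: a ++ ' ' :: b ++ [' ', '.', ' ', '\n'] ++ pvChunks rest
  | _ => []

theorem pvLoopA_eq_chunks : ∀ (lines : List (List Char)) (c : List Char),
    pvLoopA lines c [] 0 = c ++ pvChunks lines
  | [], c => by simp [pvLoopA, pvChunks]
  | [a], c => by simp [pvLoopA, pvChunks]
  | [a, b], c => by simp [pvLoopA, pvChunks]
  | a :: b :: x :: rest, c => by
      have ih := pvLoopA_eq_chunks rest (c ++ (' ' :: a) ++ (' ' :: b) ++ [' ', '.', ' ', '\n'])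
      simpa [pvLoopA, pvChunks] using ih

theorem pvJoin_verses_eq_chunks : ∀ (lines : List (List Char)),
    PySem.Chars.join [] ((List.range (lines.length / 3)).map (pvVerse lines)) = pvChunks lines
  | [] => by simp [pvChunks, PySem.Chars.join_nil]
  | [a] => by simp [pvChunks, PySem.Chars.join_nil]
  | [a, b] => by simp [pvChunks, PySem.Chars.join_nil]
  | a :: b :: x :: rest => by
      have ih := pvJoin_verses_eq_chunks rest
      have hlen : (a :: b :: x :: rest).length / 3 = rest.length / 3 + 1 := by
        simp [List.length_cons]; omega
      have hshift : ∀ k : Nat, pvVerse (a :: b :: x :: rest) (k + 1) = pvVerse rest k := by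
        intro k
        have e1 : 3 * (k + 1) = 3 * k + 1 + 1 + 1 := by ring
        simp only [pvVerse, e1, List.getD_cons_succ]
      rw [hlen, List.range_succ_eq_map, List.map_cons, List.map_map]
      have hmap : (List.range (rest.length / 3)).map (pvVerse (a :: b :: x :: rest) ∘ Nat.succ)
          = (List.range (rest.length / 3)).map (pvVerse rest) := by
        apply List.map_congr_left
        intro k _
        exact hshift k
      rw [hmap]
      cases h : (List.range (rest.length / 3)).map (pvVerse rest) with
      | nil =>
          rw [h] at ih
          simp [PySem.Chars.join_singleton, PySem.Chars.join_nil] at ih ⊢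
          simp [pvChunks, pvVerse, ← ih]
      | cons y ys =>
          rw [h] at ih
          rw [PySem.Chars.join_cons_cons, ih]
          simp [pvChunks, pvVerse]

-- ===== VERDICT (by name: the statement is the Claim_ definition above) =====
theorem get_Chi3r_form_spec : Claim_equal_get_Chi3r_form := by
  intro text _
  unfold Spec_get_Chi3r_form get_Chi3r_form get_Chi3r_form_alt
  simp only [pvLoopA_eq_chunks, pvJoin_verses_eq_chunks, List.nil_append]
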